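-- pv_equiv track=rewrite | github.com/okangenckaya/Python-Fundamentals | python_Fundamentals/Custom_Functions/Lab_09.py | detect_consonants
-- ===== SOURCE A (Python) =====
-- def detect_consonants(sentence: str) -> list:
--     from string import punctuation
--     vowels = ['a', 'e', 'ı', 'i', 'o', 'ö', 'u', 'ü']
--     caught_consonants = []
--
--     for i in sentence:
--         if i not in vowels:
--             if i not in caught_consonants:
--                 caught_consonants.append(i)
--         elif i.isdigit() or i in punctuation:
--             pass
--     return caught_consonants
-- ===== SOURCE B (Python) =====
-- def detect_consonants(sentence: str) -> list:
--     vowels = ['a', 'e', 'ı', 'i', 'o', 'ö', 'u', 'ü']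
--     # pre-pass: table of each character's first-occurrence position
--     first = {}
--     for i, c in enumerate(sentence):
--         if c not in first:
--             first[c] = i
--     # stateless filter: keep c iff it is not a vowel and this position is its first
--     return [c for i, c in enumerate(sentence)
--             if c not in vowels and first[c] == i]
-- ===== Notes on version B (the rewrite author's own statement) =====
-- stated objective: alternative
-- what changed: A filters vowels and dedups in one interleaved loop, appending to an output accumulator it scans for membership; B is two separate passes with no output accumulator: a pre-pass builds a dict mapping each character to its first-occurrence position, then a stateless comprehension keeps a character iff it is not a vowel and its position equals that first-occurrence index.
import Mathlib
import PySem

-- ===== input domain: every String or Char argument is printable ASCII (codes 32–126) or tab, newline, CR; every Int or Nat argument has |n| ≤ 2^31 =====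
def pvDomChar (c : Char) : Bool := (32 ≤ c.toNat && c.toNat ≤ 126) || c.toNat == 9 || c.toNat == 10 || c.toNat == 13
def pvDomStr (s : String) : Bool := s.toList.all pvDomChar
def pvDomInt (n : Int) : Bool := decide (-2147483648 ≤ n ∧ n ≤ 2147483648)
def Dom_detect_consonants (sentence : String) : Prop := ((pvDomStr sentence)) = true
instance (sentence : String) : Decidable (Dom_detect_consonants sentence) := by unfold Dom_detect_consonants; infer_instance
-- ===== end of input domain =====

-- B replaces A's stateful filter-and-dedup loop by two separate passes: a pre-pass
-- building a first-occurrence-index dict, then a stateless comprehension keeping a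
-- character iff it is not a vowel and its position is that first index; objective: alternative.


-- ===== PORT A =====
def pvVowels : List String := ["a", "e", "ı", "i", "o", "ö", "u", "ü"]

-- A: one loop over the characters; a non-vowel is appended iff not already collected
-- (the 'elif … pass' branch has no effect and is omitted).
def detect_consonants (sentence : String) : List String :=
  sentence.toList.foldl
    (fun caught c =>
      if String.ofList [c] ∉ pvVowels then
        (if String.ofList [c] ∉ caught then caught ++ [String.ofList [c]] else caught)
      else caught)
    []

-- ===== PORT B =====
-- pass 1 of B: first = {} ; for i, c in enumerate(sentence): if c not in first: first[c] = i
def pvFirst (l : List Char) : PySem.Dict Char Int :=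
  (PySem.List.enumerate l).foldl
    (fun d p => if d.contains p.2 then d else d.insert p.2 p.1) PySem.Dict.empty

-- pass 2 of B: keep c at position i iff c is not a vowel and first[c] == i
-- (every character of the sentence is a key of `first`, so Python's first[c] never raises;
--  get? always returns `some` here, making `get? … == some i` exact).
def detect_consonants_alt (sentence : String) : List String :=
  ((PySem.List.enumerate sentence.toList).filter
      (fun p => decide (String.ofList [p.2] ∉ pvVowels) &&
                ((pvFirst sentence.toList).get? p.2 == some p.1))).map
    (fun p => String.ofList [p.2])

-- ===== PRECONDITION & SPEC =====
def Spec_detect_consonants (sentence : String) (out : List String) : Prop := out = detect_consonants_alt sentence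
instance (sentence : String) (out : List String) : Decidable (Spec_detect_consonants sentence out) := by unfold Spec_detect_consonants; infer_instance

-- ===== CLAIM =====
def Claim_equal_detect_consonants : Prop := ∀ (sentence : String), Dom_detect_consonants sentence → Spec_detect_consonants sentence (detect_consonants sentence)

-- ===== LEMMAS AND PROOFS =====

theorem pv_mk_inj (a b : Char) : String.ofList [a] = String.ofList [b] ↔ a = b := by
  constructor
  · intro h; have := congrArg String.toList h; simpa using this
  · intro h; subst h; rfl

-- first-occurrence dedup of a char list (A's implicit state, chars only)
def pvDedup (l : List Char) : List Char :=
  l.foldl (fun a c => if c ∈ a then a else a ++ [c]) []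

-- the strings A collects, as a function of the deduped char list
def pvView (acc : List Char) : List String :=
  (acc.filter (fun c => String.ofList [c] ∉ pvVowels)).map (fun c => String.ofList [c])

theorem pv_mem_view (c : Char) (acc : List Char) :
    String.ofList [c] ∈ pvView acc ↔ (c ∈ acc ∧ String.ofList [c] ∉ pvVowels) := by
  unfold pvView
  simp only [List.mem_map, List.mem_filter]
  constructor
  · rintro ⟨a, ⟨ha, hp⟩, h⟩
    rcases (pv_mk_inj a c).mp h with rfl
    exact ⟨ha, by simpa using hp⟩
  · rintro ⟨ha, hp⟩
    exact ⟨c, ⟨ha, by simpa using hp⟩, rfl⟩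

theorem pv_view_append (acc : List Char) (c : Char) :
    pvView (acc ++ [c]) =
      pvView acc ++ (if String.ofList [c] ∉ pvVowels then [String.ofList [c]] else []) := by
  unfold pvView
  rw [List.filter_append, List.map_append]
  by_cases hv : String.ofList [c] ∈ pvVowels
  · simp [hv]
  · simp [hv]

-- A's loop computes the view of the deduped char list
theorem pv_loop (l : List Char) (acc : List Char) :
    l.foldl
      (fun caught c =>
        if String.ofList [c] ∉ pvVowels then
          (if String.ofList [c] ∉ caught then caught ++ [String.ofList [c]] else caught)
        else caught)
      (pvView acc)
    = pvView (l.foldl (fun a c => if c ∈ a then a else a ++ [c]) acc) := by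
  induction l generalizing acc with
  | nil => rfl
  | cons c l ih =>
    simp only [List.foldl_cons]
    by_cases hmem : c ∈ acc
    · rw [if_pos hmem]
      have hA : (if String.ofList [c] ∉ pvVowels then
            (if String.ofList [c] ∉ pvView acc then pvView acc ++ [String.ofList [c]] else pvView acc)
          else pvView acc) = pvView acc := by
        by_cases hv : String.ofList [c] ∈ pvVowels
        · rw [if_neg (not_not_intro hv)]
        · have hm : String.ofList [c] ∈ pvView acc := (pv_mem_view c acc).mpr ⟨hmem, hv⟩
          rw [if_pos hv, if_neg (not_not_intro hm)]
      rw [hA]; exact ih acc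
    · rw [if_neg hmem, ← ih (acc ++ [c])]
      congr 1
      rw [pv_view_append]
      by_cases hv : String.ofList [c] ∈ pvVowels
      · rw [if_neg (not_not_intro hv), if_neg (not_not_intro hv), List.append_nil]
      · have hm : String.ofList [c] ∉ pvView acc := fun h => hmem ((pv_mem_view c acc).mp h).1
        rw [if_pos hv, if_pos hm, if_pos hv]

theorem pv_mem_dedup_fold (l acc : List Char) (x : Char) :
    x ∈ l.foldl (fun a c => if c ∈ a then a else a ++ [c]) acc ↔ x ∈ acc ∨ x ∈ l := by
  induction l generalizing acc with
  | nil => simp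
  | cons c l ih =>
    simp only [List.foldl_cons]
    by_cases h : c ∈ acc
    · rw [if_pos h, ih]
      constructor
      · rintro (h1 | h1)
        · exact Or.inl h1
        · exact Or.inr (List.mem_cons_of_mem _ h1)
      · rintro (h1 | h1)
        · exact Or.inl h1
        · rcases List.mem_cons.mp h1 with rfl | h1
          · exact Or.inl h
          · exact Or.inr h1
    · rw [if_neg h, ih]
      simp only [List.mem_append, List.mem_cons]
      tauto

theorem pv_mem_dedup (l : List Char) (x : Char) : x ∈ pvDedup l ↔ x ∈ l := by
  unfold pvDedup; rw [pv_mem_dedup_fold]; simp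

theorem pv_dedup_append (l : List Char) (c : Char) :
    pvDedup (l ++ [c]) = if c ∈ pvDedup l then pvDedup l else pvDedup l ++ [c] := by
  unfold pvDedup
  rw [List.foldl_append]
  rfl

-- B's condition and result, abstracted over which list index? is taken in
def pvCond (src : List Char) (p : Int × Char) : Bool :=
  decide (String.ofList [p.2] ∉ pvVowels) &&
    ((PySem.List.index? src p.2).map (fun k => (k : Int)) == some p.1)

-- B's stateless filter computes the same view
theorem pv_b_loop (l : List Char) :
    ((PySem.List.enumerate l).filter (pvCond l)).map (fun p => String.ofList [p.2])
      = pvView (pvDedup l) := by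
  induction l using List.reverseRecOn with
  | nil => rfl
  | append_singleton l c ih =>
    rw [PySem.List.enumerate_append, List.filter_append, List.map_append]
    have hcong : (PySem.List.enumerate l).filter (pvCond (l ++ [c]))
        = (PySem.List.enumerate l).filter (pvCond l) := by
      apply List.filter_congr
      intro p hp
      rcases (PySem.List.mem_enumerate_iff _ _ _).mp hp with ⟨k, hk, rfl⟩
      unfold pvCond
      rw [PySem.List.index?_append_of_mem _ (List.getElem_mem hk)]
    rw [hcong, ih, pv_dedup_append]
    by_cases hmem : c ∈ l
    · have hd : c ∈ pvDedup l := (pv_mem_dedup l c).mpr hmem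
      rw [if_pos hd]
      have hdrop : (PySem.List.enumerate [c] (0 + (l.length : Int))).filter (pvCond (l ++ [c])) = [] := by
        simp only [PySem.List.enumerate_cons, PySem.List.enumerate_nil]
        rcases (PySem.List.index?_isSome_iff l c).mpr hmem |> Option.isSome_iff_exists.mp with ⟨k, hk⟩
        have hklt : k < l.length := by
          rcases PySem.List.getElem_of_index?_eq_some hk with ⟨h1, _, _⟩
          exact h1
        unfold pvCond
        have hidx : PySem.List.index? (l ++ [c]) c = some k := by
          rw [PySem.List.index?_append_of_mem _ hmem, hk]
        simp only [List.filter_cons, List.filter_nil, hidx]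
        simp [Option.map]
        intro _; omega
      rw [hdrop, List.map_nil, List.append_nil]
    · have hd : c ∉ pvDedup l := fun h => hmem ((pv_mem_dedup l c).mp h)
      rw [if_neg hd, pv_view_append]
      congr 1
      have hidx := PySem.List.index?_append_singleton_self l c hmem
      simp only [PySem.List.enumerate_cons, PySem.List.enumerate_nil]
      unfold pvCond
      simp only [List.filter_cons, List.filter_nil, hidx]
      by_cases hv : String.ofList [c] ∈ pvVowels
      · simp [hv]
      · simp [hv]


-- the first-occurrence dict computes index?
theorem pv_first_get (l : List Char) : ∀ x : Char,
    (pvFirst l).get? x = (PySem.List.index? l x).map (fun k => (k : Int)) := by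
  induction l using List.reverseRecOn with
  | nil =>
    intro x
    simp [pvFirst, PySem.List.enumerate_nil]
  | append_singleton l c ih =>
    intro x
    have hstep : pvFirst (l ++ [c]) =
        if (pvFirst l).contains c then pvFirst l
        else (pvFirst l).insert c (0 + (l.length : Int)) := by
      unfold pvFirst
      rw [PySem.List.enumerate_append, List.foldl_append]
      simp [PySem.List.enumerate_cons, PySem.List.enumerate_nil]
    by_cases hmem : c ∈ l
    · have hc : (pvFirst l).contains c = true := by
        rw [PySem.Dict.contains_eq_isSome_get?, ih c]
        rcases Option.isSome_iff_exists.mp ((PySem.List.index?_isSome_iff l c).mpr hmem) with ⟨k, hk⟩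
        rw [hk]
        rfl
      rw [hstep, if_pos hc]
      by_cases hx : x ∈ l
      · rw [PySem.List.index?_append_of_mem _ hx]; exact ih x
      · have hx' : x ∉ l ++ [c] := by
          intro h
          rcases List.mem_append.mp h with h | h
          · exact hx h
          · exact hx ((List.mem_singleton.mp h) ▸ hmem)
        rw [(PySem.List.index?_eq_none_iff _ _).mpr hx', ih x,
            (PySem.List.index?_eq_none_iff _ _).mpr hx]
    · have hc : (pvFirst l).contains c = false := by
        rw [PySem.Dict.contains_eq_isSome_get?, ih c,
            (PySem.List.index?_eq_none_iff _ _).mpr hmem]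
        rfl
      rw [hstep, if_neg (by simp [hc]), PySem.Dict.get?_insert]
      by_cases hxc : x = c
      · subst hxc
        rw [if_pos rfl, PySem.List.index?_append_singleton_self l x hmem]
        simp
      · rw [if_neg hxc, ih x]
        by_cases hx : x ∈ l
        · rw [PySem.List.index?_append_of_mem _ hx]
        · have hx' : x ∉ l ++ [c] := by
            simp only [List.mem_append, List.mem_singleton]
            rintro (h | rfl)
            · exact hx h
            · exact hxc rfl
          rw [(PySem.List.index?_eq_none_iff _ _).mpr hx',
              (PySem.List.index?_eq_none_iff _ _).mpr hx]

-- B's filter condition is pvCond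
theorem pv_cond_eq (src : List Char) :
    (fun p : Int × Char => decide (String.ofList [p.2] ∉ pvVowels) &&
        ((pvFirst src).get? p.2 == some p.1)) = pvCond src := by
  funext p
  unfold pvCond
  rw [pv_first_get]

-- ===== VERDICT =====
theorem detect_consonants_spec : Claim_equal_detect_consonants := by
  intro sentence _
  unfold Spec_detect_consonants detect_consonants detect_consonants_alt
  have hA := pv_loop sentence.toList []
  have hB := pv_b_loop sentence.toList
  rw [show pvView [] = ([] : List String) from rfl] at hA
  rw [hA, pv_cond_eq, hB]
  rfl
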